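-- pv_equiv track=rewrite | github.com/vinayduggi/bioinformaticsspecialization | FindingHiddenMessagesInDNA/FrequencyMap.py | FrequencyMap
-- ===== SOURCE A (Python) =====
-- def FrequencyMap(Text, k):
--     freq = {}
--     n = len(Text)
--     for i in range(n-k+1):
--         Pattern = Text[i:i+k]
--         freq[Pattern] = 0
--         for i in range(n-k+1):
--             if Text[i:i+k] == Pattern:
--                     freq[Pattern] = freq[Pattern]+1
--     return freq
-- ===== SOURCE B (Python) =====
-- def FrequencyMap(Text, k):
--     freq = {}
--     for i in range(len(Text) - k + 1):
--         kmer = Text[i:i+k]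
--         freq[kmer] = freq.get(kmer, 0) + 1
--     return freq
-- ===== Notes on version B (the rewrite author's own statement) =====
-- stated objective: faster
-- what changed: A recounts the whole text from scratch for every position (nested full scans); B makes a single pass, incrementing a running count per k-mer in one dict built once, so the inner scan disappears; intended as faster: a timing run measured B 23.6x-55x faster at the largest sizes where A finished (A timed out beyond that, though that run could not certify B there).
import Mathlib
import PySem

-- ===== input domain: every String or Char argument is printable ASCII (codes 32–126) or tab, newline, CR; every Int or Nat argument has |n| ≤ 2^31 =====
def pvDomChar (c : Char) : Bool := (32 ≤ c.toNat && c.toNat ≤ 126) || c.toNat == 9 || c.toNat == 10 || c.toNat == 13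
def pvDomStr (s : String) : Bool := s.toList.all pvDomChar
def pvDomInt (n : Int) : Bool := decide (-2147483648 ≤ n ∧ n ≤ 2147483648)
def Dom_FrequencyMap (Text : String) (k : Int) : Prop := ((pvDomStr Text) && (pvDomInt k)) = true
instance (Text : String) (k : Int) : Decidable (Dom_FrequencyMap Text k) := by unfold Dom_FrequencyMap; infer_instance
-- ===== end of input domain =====

-- B replaces A's rescan-per-position with one single counting pass (same dict, same insertion order); intended as faster (probe measured 23.6x at the largest size both finished).

-- ===== PORT A =====
def FrequencyMap (Text : String) (k : Int) : List (String × Int) :=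
  ((PySem.List.pyRange 0 ((PySem.Str.len Text) - k + 1) 1).foldl (fun freq i =>
      (PySem.List.pyRange 0 ((PySem.Str.len Text) - k + 1) 1).foldl (fun freq j =>
          if PySem.Str.slice Text (some j) (some (j + k)) == PySem.Str.slice Text (some i) (some (i + k)) then
            freq.insert (PySem.Str.slice Text (some i) (some (i + k)))
              (freq.getD (PySem.Str.slice Text (some i) (some (i + k))) 0 + 1)
          else freq)
        (freq.insert (PySem.Str.slice Text (some i) (some (i + k))) 0))
    PySem.Dict.empty).items

-- ===== PORT B =====
def FrequencyMap_alt (Text : String) (k : Int) : List (String × Int) :=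
  ((PySem.List.pyRange 0 ((PySem.Str.len Text) - k + 1) 1).foldl (fun freq i =>
      let kmer := PySem.Str.slice Text (some i) (some (i + k))
      freq.insert kmer (freq.getD kmer 0 + 1))
    PySem.Dict.empty).items

-- ===== PRECONDITION & SPEC =====
def Spec_FrequencyMap (Text : String) (k : Int) (out : List (String × Int)) : Prop := out = FrequencyMap_alt Text k
instance (Text : String) (k : Int) (out : List (String × Int)) : Decidable (Spec_FrequencyMap Text k out) := by unfold Spec_FrequencyMap; infer_instance

-- ===== CLAIM (what is proved, stated in full; the proofs are below) =====
def Claim_equal_FrequencyMap : Prop := ∀ (Text : String) (k : Int), Dom_FrequencyMap Text k → Spec_FrequencyMap Text k (FrequencyMap Text k)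

-- ===== LEMMAS AND PROOFS =====

-- A's inner loop over the k-mer list ys, started at d[P] := c, ends with d[P] = c + (count of P in ys).
theorem pv_inner_count (P : String) (ys : List String) (d : PySem.Dict String Int) (c : Int) :
    ys.foldl (fun freq Q => if Q == P then freq.insert P (freq.getD P 0 + 1) else freq) (d.insert P c)
      = d.insert P (c + ys.count P) := by
  induction ys generalizing c with
  | nil => simp
  | cons Q ys ih =>
    by_cases h : Q = P
    · subst h
      simp only [List.foldl_cons, BEq.rfl, if_true, PySem.Dict.getD_insert_self,
        PySem.Dict.insert_insert_self, ih, List.count_cons_self]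
      push_cast; ring_nf
    · have h' : P ≠ Q := Ne.symm h
      simp only [List.foldl_cons]
      rw [if_neg (by simpa using h), ih]
      simp [h]

-- Folding 'insert k (m k)' (value a function of the key alone) from a dict whose items are already
-- of that shape yields items for exactly Set.update of the keys, in order.
theorem pv_items_foldl_insert_const (m : String → Int) (l : List String) :
    ∀ (S : PySem.Set String), S.Nodup →
    (l.foldl (fun d P => d.insert P (m P)) (PySem.Dict.mk (S.map fun x => (x, m x)))).items
      = (PySem.Set.update S l).map fun x => (x, m x) := by
  induction l with
  | nil => intro S _; rfl
  | cons P l ih =>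
    intro S hS
    have hkeys : (PySem.Dict.mk (S.map fun x => (x, m x))).keys = S := by
      simp [PySem.Dict.keys, Function.comp_def]
    by_cases hmem : P ∈ S
    · have hc : (PySem.Dict.mk (S.map fun x => (x, m x))).contains P = true := by
        rw [PySem.Dict.contains_iff_mem_keys, hkeys]; exact hmem
      have hstep : (PySem.Dict.mk (S.map fun x => (x, m x))).insert P (m P)
          = PySem.Dict.mk (S.map fun x => (x, m x)) := by
        apply PySem.Dict.ext
        rw [PySem.Dict.items_insert_of_contains _ _ hc]
        show (S.map fun x => (x, m x)).map _ = _
        rw [List.map_map]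
        refine List.map_congr_left ?_
        intro x _
        by_cases hx : x = P
        · subst hx; simp
        · simp [hx]
      simp only [List.foldl_cons, hstep, PySem.Set.update_cons, PySem.Set.add_of_mem hmem]
      exact ih S hS
    · have hc : (PySem.Dict.mk (S.map fun x => (x, m x))).contains P = false := by
        rw [Bool.eq_false_iff]
        intro hcon
        exact hmem (by rw [← hkeys]; exact (PySem.Dict.contains_iff_mem_keys _ _).mp hcon)
      have hstep : (PySem.Dict.mk (S.map fun x => (x, m x))).insert P (m P)
          = PySem.Dict.mk ((PySem.Set.add S P).map fun x => (x, m x)) := by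
        apply PySem.Dict.ext
        rw [PySem.Dict.items_insert_of_not_contains _ _ hc]
        show (S.map fun x => (x, m x)) ++ [(P, m P)] = _
        rw [PySem.Set.add_of_not_mem hmem, List.map_append]; rfl
      have hnd : (PySem.Set.add S P).Nodup := by
        rw [PySem.Set.add_of_not_mem hmem]
        refine hS.append (List.nodup_singleton P) ?_
        intro a ha hb
        rw [List.mem_singleton] at hb
        exact hmem (hb ▸ ha)
      simp only [List.foldl_cons, hstep, PySem.Set.update_cons]
      exact ih _ hnd

-- Consequence: folding 'insert x (count x in xs)' over xs from empty IS counter xs.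
theorem pv_foldl_insert_count_eq_counter (xs : List String) :
    xs.foldl (fun d P => d.insert P ((xs.count P : Int))) PySem.Dict.empty
      = PySem.Dict.counter xs := by
  apply PySem.Dict.ext
  rw [PySem.Dict.items_counter]
  have h := pv_items_foldl_insert_const (fun P => ((xs.count P : Int))) xs [] List.nodup_nil
  rw [PySem.Set.update_nil_left] at h
  simpa using h

-- The whole equivalence, for an arbitrary index list and slicing function.
theorem pv_main (sl : Int → String) (idx : List Int) :
    (idx.foldl (fun (freq : PySem.Dict String Int) i =>
        idx.foldl (fun freq2 j =>
            if sl j == sl i then freq2.insert (sl i) (freq2.getD (sl i) 0 + 1) else freq2)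
          (freq.insert (sl i) 0)) PySem.Dict.empty).items
    = (idx.foldl (fun freq i => freq.insert (sl i) (freq.getD (sl i) 0 + 1)) PySem.Dict.empty).items := by
  have hB : (idx.map sl).foldl (fun (d : PySem.Dict String Int) x => d.insert x (d.getD x 0 + 1))
        PySem.Dict.empty
      = idx.foldl (fun d i => d.insert (sl i) (d.getD (sl i) 0 + 1)) PySem.Dict.empty := by
    rw [List.foldl_map]
  have hInner : ∀ (d : PySem.Dict String Int) (i : Int),
      idx.foldl (fun d2 j => if sl j == sl i then d2.insert (sl i) (d2.getD (sl i) 0 + 1) else d2)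
        (d.insert (sl i) 0)
      = d.insert (sl i) (((idx.map sl).count (sl i) : Int)) := by
    intro d i
    have h : (idx.map sl).foldl
          (fun (d2 : PySem.Dict String Int) Q =>
            if Q == sl i then d2.insert (sl i) (d2.getD (sl i) 0 + 1) else d2)
          (d.insert (sl i) 0)
        = idx.foldl
          (fun d2 j => if sl j == sl i then d2.insert (sl i) (d2.getD (sl i) 0 + 1) else d2)
          (d.insert (sl i) 0) := by
      rw [List.foldl_map]
    rw [← h, pv_inner_count]
    simp
  have hA : idx.foldl (fun (freq : PySem.Dict String Int) i =>
        idx.foldl (fun freq2 j =>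
            if sl j == sl i then freq2.insert (sl i) (freq2.getD (sl i) 0 + 1) else freq2)
          (freq.insert (sl i) 0)) PySem.Dict.empty
      = (idx.map sl).foldl (fun d P => d.insert P (((idx.map sl).count P : Int))) PySem.Dict.empty := by
    have h1 : (fun (freq : PySem.Dict String Int) (i : Int) =>
        idx.foldl (fun freq2 j =>
            if sl j == sl i then freq2.insert (sl i) (freq2.getD (sl i) 0 + 1) else freq2)
          (freq.insert (sl i) 0))
        = fun freq i => freq.insert (sl i) (((idx.map sl).count (sl i) : Int)) := by
      funext d i; exact hInner d i
    rw [h1, List.foldl_map]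
  rw [hA, ← hB, pv_foldl_insert_count_eq_counter,
    PySem.Dict.foldl_insert_getD_add_one_eq_counter]

-- ===== VERDICT (by name: the statement is the Claim_ definition above) =====
theorem FrequencyMap_spec : Claim_equal_FrequencyMap := by
  intro Text k _
  show FrequencyMap Text k = FrequencyMap_alt Text k
  unfold FrequencyMap FrequencyMap_alt
  exact pv_main (fun i => PySem.Str.slice Text (some i) (some (i + k)))
    (PySem.List.pyRange 0 ((PySem.Str.len Text) - k + 1) 1)
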